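-- pv_equiv track=rewrite | github.com/Valentin387/ML_Translator | main.py | find_the_type
-- ===== SOURCE A (Python) =====
-- def find_the_type(list_of_Type_dictionaries,word):
--     type=""
--     for d in list_of_Type_dictionaries:
--         for new_k,new_val in d.items():
--             for i in new_val:
--                 if word==i:
--                     type=new_k
--                     break
--     return type
-- ===== SOURCE B (Python) =====
-- def find_the_type(list_of_Type_dictionaries, word):
--     # Scan backward and return on the first hit: same "last matching key" result.
--     for d in reversed(list_of_Type_dictionaries):
--         for k, val in reversed(list(d.items())):
--             if word in val:
--                 return k
--     return ""
-- ===== Notes on version B (the rewrite author's own statement) =====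
-- stated objective: alternative
-- what changed: B scans the dicts and their items in reverse and returns on the first value-list containing the word (early termination), instead of A's full forward scan that keeps overwriting the last matching key.
import Mathlib
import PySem

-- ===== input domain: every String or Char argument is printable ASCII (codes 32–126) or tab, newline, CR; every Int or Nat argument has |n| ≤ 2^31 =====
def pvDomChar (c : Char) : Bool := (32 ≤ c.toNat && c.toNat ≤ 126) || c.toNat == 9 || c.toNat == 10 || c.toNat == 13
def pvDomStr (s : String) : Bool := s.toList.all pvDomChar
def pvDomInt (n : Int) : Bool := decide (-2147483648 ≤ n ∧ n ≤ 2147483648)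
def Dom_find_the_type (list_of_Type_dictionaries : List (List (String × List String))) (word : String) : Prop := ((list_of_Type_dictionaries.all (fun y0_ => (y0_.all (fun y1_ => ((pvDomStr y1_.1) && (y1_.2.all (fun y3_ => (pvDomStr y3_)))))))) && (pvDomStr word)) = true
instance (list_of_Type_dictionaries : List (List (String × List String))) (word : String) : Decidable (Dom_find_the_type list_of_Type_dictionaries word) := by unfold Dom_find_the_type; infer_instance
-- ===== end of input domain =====

-- B replaces A's full forward scan with overwrite by a reversed scan with early return (same value).
-- ===== PORT A =====
-- A: forward full scan; `type` is overwritten by each (dict,key) whose value list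
-- contains the word; the innermost loop with `break` is scanValsA (first equal element wins).
def scanValsA (word : String) (new_k : String) (ty : String) : List String → String
  | [] => ty
  | i :: rest => if word == i then new_k else scanValsA word new_k ty rest

def find_the_type (list_of_Type_dictionaries : List (List (String × List String))) (word : String) : String :=
  list_of_Type_dictionaries.foldl
    (fun ty d => d.foldl (fun ty kv => scanValsA word kv.1 ty kv.2) ty) ""

-- ===== PORT B =====
-- B: reversed scan with early return on the first dict item whose value list contains the word.
def firstKeyB (word : String) : List (String × List String) → Option String
  | [] => none
  | kv :: rest => if kv.2.contains word then some kv.1 else firstKeyB word rest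

def goB (word : String) : List (List (String × List String)) → String
  | [] => ""
  | d :: rest =>
      match firstKeyB word d.reverse with
      | some k => k
      | none => goB word rest

def find_the_type_alt (list_of_Type_dictionaries : List (List (String × List String))) (word : String) : String :=
  goB word list_of_Type_dictionaries.reverse

-- ===== PRECONDITION & SPEC =====
def Spec_find_the_type (list_of_Type_dictionaries : List (List (String × List String))) (word : String) (out : String) : Prop := out = find_the_type_alt list_of_Type_dictionaries word
instance (list_of_Type_dictionaries : List (List (String × List String))) (word : String) (out : String) : Decidable (Spec_find_the_type list_of_Type_dictionaries word out) := by unfold Spec_find_the_type; infer_instance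

-- ===== CLAIM (what is proved, stated in full; the proofs are below) =====
def Claim_equal_find_the_type : Prop := ∀ (list_of_Type_dictionaries : List (List (String × List String))) (word : String), Dom_find_the_type list_of_Type_dictionaries word → Spec_find_the_type list_of_Type_dictionaries word (find_the_type list_of_Type_dictionaries word)

-- ===== LEMMAS AND PROOFS =====
-- hit word k : Option String = some k iff the value list contains word (innermost loop's effect)
theorem scanValsA_eq (word k ty : String) (v : List String) :
    scanValsA word k ty v = if v.contains word then k else ty := by
  induction v with
  | nil => simp [scanValsA]
  | cons i rest ih =>
      simp only [scanValsA, List.contains_cons]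
      by_cases h : word == i
      · have h' : (i == word) = true := by
          simpa [BEq.comm] using h
        simp [h, h']
      · have h' : (i == word) = false := by
          cases hb : (i == word) with
          | false => rfl
          | true => exact absurd (by simpa [BEq.comm] using hb) h
        simp [h, h', ih]

theorem firstKeyB_append (word : String) (xs ys : List (String × List String)) :
    firstKeyB word (xs ++ ys) = (firstKeyB word xs).or (firstKeyB word ys) := by
  induction xs with
  | nil => simp [firstKeyB]
  | cons kv rest ih =>
      simp only [List.cons_append, firstKeyB]
      split_ifs with h
      · simp
      · simpa using ih

theorem innerG (word : String) (d : List (String × List String)) (ty : String) :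
    d.foldl (fun ty kv => if kv.2.contains word then kv.1 else ty) ty
      = (firstKeyB word d.reverse).getD ty := by
  induction d generalizing ty with
  | nil => simp [firstKeyB]
  | cons kv rest ih =>
      simp only [List.foldl_cons, List.reverse_cons, firstKeyB_append, ih, firstKeyB]
      cases h : firstKeyB word rest.reverse with
      | some k => simp [Option.or]
      | none =>
          by_cases hc : word ∈ kv.2 <;> simp [hc, Option.or]

theorem inner_foldl_eq (word : String) (d : List (String × List String)) (ty : String) :
    d.foldl (fun ty kv => scanValsA word kv.1 ty kv.2) ty
      = (firstKeyB word d.reverse).getD ty := by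
  simp only [scanValsA_eq]
  exact innerG word d ty

def firstHit (word : String) : List (List (String × List String)) → Option String
  | [] => none
  | d :: rest => (firstKeyB word d.reverse).or (firstHit word rest)

theorem firstHit_append (word : String) (xs ys : List (List (String × List String))) :
    firstHit word (xs ++ ys) = (firstHit word xs).or (firstHit word ys) := by
  induction xs with
  | nil => simp [firstHit]
  | cons d rest ih => simp [firstHit, ih, Option.or_assoc]

theorem goB_eq_firstHit (word : String) (l : List (List (String × List String))) :
    goB word l = (firstHit word l).getD "" := by
  induction l with
  | nil => simp [goB, firstHit]
  | cons d rest ih =>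
      simp only [goB, firstHit]
      cases h : firstKeyB word d.reverse with
      | some k => simp [h, Option.or]
      | none => simp [h, Option.or, ih]

theorem outerG (word : String) (l : List (List (String × List String))) (ty : String) :
    l.foldl (fun ty d => (firstKeyB word d.reverse).getD ty) ty
      = (firstHit word l.reverse).getD ty := by
  induction l generalizing ty with
  | nil => simp [firstHit]
  | cons d rest ih =>
      simp only [List.foldl_cons, List.reverse_cons, firstHit_append, ih, firstHit]
      cases h : firstHit word rest.reverse with
      | some k => simp [Option.or]
      | none =>
          cases h2 : firstKeyB word d.reverse <;> simp [Option.or]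

theorem outer_foldl_eq (word : String) (l : List (List (String × List String))) (ty : String) :
    l.foldl (fun ty d => d.foldl (fun ty kv => scanValsA word kv.1 ty kv.2) ty) ty
      = (firstHit word l.reverse).getD ty := by
  simp only [inner_foldl_eq]
  exact outerG word l ty

-- ===== VERDICT (by name: the statement is the Claim_ definition above) =====
theorem find_the_type_spec : Claim_equal_find_the_type := by
  intro l word _
  unfold Spec_find_the_type find_the_type find_the_type_alt
  rw [outer_foldl_eq, goB_eq_firstHit]
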